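-- pv_equiv track=rewrite | github.com/dice-2004/Discord-agent | src/tools/research_loop.py | _normalize_extracted_url
-- ===== SOURCE A (Python) =====
-- def _normalize_extracted_url(url: str) -> str:
--     clean = (url or "").strip()
--     if not clean:
--         return ""
--     for marker in ("\\n", "/n", "\n"):
--         idx = clean.find(marker)
--         if idx >= 0:
--             clean = clean[:idx]
--     clean = clean.rstrip('.,;)-')
--     if not clean.startswith("http://") and not clean.startswith("https://"):
--         return ""
--     return clean
-- ===== SOURCE B (Python) =====
-- def _normalize_extracted_url(url: str) -> str:
--     s = (url or "").strip()
--     out = []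
--     i = 0
--     n = len(s)
--     while i < n:
--         c = s[i]
--         if c == '\n' or (c in '\\/' and i + 1 < n and s[i + 1] == 'n'):
--             break
--         out.append(c)
--         i += 1
--     while out and out[-1] in '.,;)-':
--         out.pop()
--     res = ''.join(out)
--     return res if res.startswith(('http://', 'https://')) else ''
-- ===== Notes on version B (the rewrite author's own statement) =====
-- stated objective: alternative
-- what changed: Replaces A's three sequential substring-find-and-reslice passes by a single left-to-right character scan with one-character lookahead that accumulates the prefix until the first marker, and replaces rstrip by an explicit pop-trailing-punctuation loop on the accumulator before one final prefix check.
import Mathlib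
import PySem

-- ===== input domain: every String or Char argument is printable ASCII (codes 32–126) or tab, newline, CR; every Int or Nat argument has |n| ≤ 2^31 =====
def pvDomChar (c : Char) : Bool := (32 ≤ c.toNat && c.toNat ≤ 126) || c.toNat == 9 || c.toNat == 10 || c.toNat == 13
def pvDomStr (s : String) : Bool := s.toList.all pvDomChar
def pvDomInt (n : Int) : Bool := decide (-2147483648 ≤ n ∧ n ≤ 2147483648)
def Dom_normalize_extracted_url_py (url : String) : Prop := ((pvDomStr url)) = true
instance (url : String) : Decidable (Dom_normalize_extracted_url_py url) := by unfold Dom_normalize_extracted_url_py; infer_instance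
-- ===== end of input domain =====

-- B replaces A's three sequential find-and-slice passes by ONE streaming left-to-right scan
-- with a one-character lookahead that stops at the first marker, plus a pop-trailing-punctuation
-- loop instead of rstrip (objective: alternative decomposition, single pass with an accumulator).

-- hand port of str.rstrip(chars) (PySem has no chars-variant of rstrip): drop trailing
-- characters that are in the set; exact on all inputs
def pyRstripChars (s chars : String) : String :=
  String.ofList ((s.toList.reverse.dropWhile (fun c => chars.toList.contains c)).reverse)

-- ===== PORT A =====
def normalize_extracted_url_py (url : String) : String :=
  -- '(url or "")' is url itself for strings (falsy only when empty, and then "" = url)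
  let clean := PySem.Str.strip url
  if clean = "" then ""
  else
    let clean := List.foldl (fun cl m =>
        let idx := PySem.Str.find cl m
        if 0 ≤ idx then PySem.Str.slice cl none (some idx) else cl)
      clean ["\\n", "/n", "\n"]
    let clean := pyRstripChars clean ".,;)-"
    if !(PySem.Str.startswith clean "http://") && !(PySem.Str.startswith clean "https://")
    then "" else clean

-- ===== PORT B =====
-- the stop test of B's scan: current char is '\n', or it is '\\' or '/' and the next char is 'n'
def pvStop (c : Char) (rest : List Char) : Bool :=
  c == '\n' || ((c == '\\' || c == '/') && rest.head? == some 'n')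

-- B's while-loop: copy characters into the accumulator until the stop test fires
def pvCut : List Char → List Char
  | [] => []
  | c :: rest => if pvStop c rest then [] else c :: pvCut rest

-- B's pop loop: remove trailing characters of '.,;)-'
def pvDropTrail (out : List Char) : List Char :=
  (out.reverse.dropWhile (fun ch => (".,;)-".toList).contains ch)).reverse

def normalize_extracted_url_py_alt (url : String) : String :=
  let s := PySem.Str.strip url
  let out := pvCut s.toList
  let res := String.ofList (pvDropTrail out)
  if PySem.Str.startswith res "http://" || PySem.Str.startswith res "https://" then res else ""

-- ===== PRECONDITION & SPEC =====
def Spec_normalize_extracted_url_py (url : String) (out : String) : Prop := out = normalize_extracted_url_py_alt url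
instance (url : String) (out : String) : Decidable (Spec_normalize_extracted_url_py url out) := by unfold Spec_normalize_extracted_url_py; infer_instance

-- ===== CLAIM (what is proved, stated in full; the proofs are below) =====
def Claim_equal_normalize_extracted_url_py : Prop := ∀ (url : String), Dom_normalize_extracted_url_py url → Spec_normalize_extracted_url_py url (normalize_extracted_url_py url)

-- ===== LEMMAS AND PROOFS =====

-- "some marker starts at position i of l"
def pvMarkerAt (l : List Char) (i : ℕ) : Prop :=
  ['\n'] <+: l.drop i ∨ ['\\', 'n'] <+: l.drop i ∨ ['/', 'n'] <+: l.drop i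

-- the stop test is exactly "a marker starts here"
lemma stop_iff (c : Char) (rest : List Char) :
    pvStop c rest = true ↔ pvMarkerAt (c :: rest) 0 := by
  cases rest with
  | nil =>
      simp [pvStop, pvMarkerAt, List.prefix_cons_iff]
      exact eq_comm
  | cons d t =>
      simp [pvStop, pvMarkerAt, List.prefix_cons_iff]
      constructor
      · rintro (h | ⟨h1 | h1, h2⟩)
        · exact Or.inl h.symm
        · exact Or.inr (Or.inl ⟨h1.symm, h2.symm⟩)
        · exact Or.inr (Or.inr ⟨h1.symm, h2.symm⟩)
      · rintro (h | ⟨h1, h2⟩ | ⟨h1, h2⟩)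
        · exact Or.inl h.symm
        · exact Or.inr ⟨Or.inl h1.symm, h2.symm⟩
        · exact Or.inr ⟨Or.inr h1.symm, h2.symm⟩

lemma markerAt_cons (c : Char) (rest : List Char) (i : ℕ) :
    pvMarkerAt (c :: rest) (i + 1) ↔ pvMarkerAt rest i := by
  simp [pvMarkerAt]

-- if no marker occurs anywhere, the scan copies everything
lemma pvCut_all (l : List Char) (h : ∀ i, ¬ pvMarkerAt l i) : pvCut l = l := by
  induction l with
  | nil => rfl
  | cons c rest ih =>
      have hs : pvStop c rest = false := by
        cases hb : pvStop c rest
        · rfl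
        · exact absurd ((stop_iff c rest).mp hb) (h 0)
      rw [pvCut, hs, if_neg Bool.false_ne_true]
      rw [ih (fun i => by have := h (i + 1); rwa [markerAt_cons] at this)]

-- if the first marker starts at j, the scan is exactly take j
lemma pvCut_take (l : List Char) (j : ℕ) (hj : pvMarkerAt l j)
    (hmin : ∀ i < j, ¬ pvMarkerAt l i) : pvCut l = l.take j := by
  induction l generalizing j with
  | nil =>
      exfalso
      rcases hj with h | h | h <;> simp at h
  | cons c rest ih =>
      cases j with
      | zero =>
          have hs : pvStop c rest = true := (stop_iff c rest).mpr hj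
          rw [pvCut, hs]; simp
      | succ j' =>
          have hs : pvStop c rest = false := by
            cases hb : pvStop c rest
            · rfl
            · exact absurd ((stop_iff c rest).mp hb) (hmin 0 (Nat.succ_pos _))
          rw [pvCut, hs, if_neg Bool.false_ne_true, List.take_succ_cons]
          rw [ih j' ((markerAt_cons c rest j').mp hj)
              (fun i hi => by
                have := hmin (i + 1) (by omega)
                rwa [markerAt_cons] at this)]

-- an occurrence inside a take is an occurrence that fits inside the take
lemma prefix_drop_take {m s : List Char} {i k : ℕ} (hm : m ≠ [])
    (h : m <+: (s.take k).drop i) : m <+: s.drop i ∧ i + m.length ≤ k := by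
  rw [List.drop_take] at h
  rcases List.prefix_take_iff.mp h with ⟨h1, h2⟩
  have hlen : 0 < m.length := List.length_pos_of_ne_nil hm
  exact ⟨h1, by omega⟩

-- find points at the first occurrence: the converse direction
lemma find_eq_of_first {s m : List Char} {j : ℕ} (hocc : m <+: s.drop j)
    (hmin : ∀ i < j, ¬ m <+: s.drop i) : PySem.Chars.find s m = (j : Int) := by
  have hin : PySem.Chars.isIn m s = true :=
    (PySem.Chars.exists_prefix_drop_iff_isIn m s).mp ⟨j, hocc⟩
  have h0 : 0 ≤ PySem.Chars.find s m :=
    (PySem.Chars.find_nonneg_iff s m).mpr ((PySem.Chars.isIn_iff_infix m s).mp hin)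
  rcases PySem.Chars.find_spec h0 with ⟨hf, hfmin⟩
  have : (PySem.Chars.find s m).toNat = j := by
    rcases Nat.lt_trichotomy (PySem.Chars.find s m).toNat j with h | h | h
    · exact absurd hf (hmin _ h)
    · exact h
    · exact absurd hocc (hfmin _ h)
  omega

-- find inside a prefix: the first occurrence overall, iff it fits
lemma find_take {s m : List Char} (k : ℕ) (hm : m ≠ []) :
    PySem.Chars.find (s.take k) m =
      if 0 ≤ PySem.Chars.find s m ∧ (PySem.Chars.find s m).toNat + m.length ≤ k
      then PySem.Chars.find s m else -1 := by
  split_ifs with h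
  · rcases h with ⟨h0, hfit⟩
    rcases PySem.Chars.find_spec h0 with ⟨hf, hfmin⟩
    have hocc : m <+: (s.take k).drop (PySem.Chars.find s m).toNat := by
      rw [List.drop_take]
      exact List.prefix_take_iff.mpr ⟨hf, by omega⟩
    have := find_eq_of_first hocc (fun i hi hp => hfmin i hi (prefix_drop_take hm hp).1)
    omega
  · rw [PySem.Chars.find_eq_neg_one_iff]
    intro hin
    have : ∃ j, m <+: (s.take k).drop j :=
      (PySem.Chars.exists_prefix_drop_iff_isIn m (s.take k)).mpr
        ((PySem.Chars.isIn_iff_infix m (s.take k)).mpr hin)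
    rcases this with ⟨j, hj⟩
    rcases prefix_drop_take hm hj with ⟨hocc, hfit⟩
    have h0 : 0 ≤ PySem.Chars.find s m :=
      (PySem.Chars.find_nonneg_iff s m).mpr
        ((PySem.Chars.isIn_iff_infix m s).mp
          ((PySem.Chars.exists_prefix_drop_iff_isIn m s).mp ⟨j, hocc⟩))
    rcases PySem.Chars.find_spec h0 with ⟨_, hfmin⟩
    have hj2 : (PySem.Chars.find s m).toNat ≤ j := by
      by_contra hc
      exact hfmin j (by omega) hocc
    exact h ⟨h0, by omega⟩

-- a "/n" occurrence strictly before the first "\n"-escape occurrence cannot straddle it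
lemma no_straddle {s : List Char}
    (h1 : 0 ≤ PySem.Chars.find s ['\\', 'n'])
    (h2 : 0 ≤ PySem.Chars.find s ['/', 'n'])
    (hlt : (PySem.Chars.find s ['/', 'n']).toNat < (PySem.Chars.find s ['\\', 'n']).toNat) :
    (PySem.Chars.find s ['/', 'n']).toNat + 2 ≤ (PySem.Chars.find s ['\\', 'n']).toNat := by
  by_contra hc
  have heq : (PySem.Chars.find s ['/', 'n']).toNat + 1
      = (PySem.Chars.find s ['\\', 'n']).toNat := by omega
  rcases (PySem.Chars.find_spec h2).1 with ⟨t2, ht2⟩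
  rcases (PySem.Chars.find_spec h1).1 with ⟨t1, ht1⟩
  rw [← heq] at ht1
  have : s.drop ((PySem.Chars.find s ['/', 'n']).toNat + 1)
      = (s.drop (PySem.Chars.find s ['/', 'n']).toNat).drop 1 := by
    rw [List.drop_drop]
  rw [this, ← ht2] at ht1
  simp at ht1

-- toList of a Python prefix slice
lemma slice_take_toList (s : String) (i : Int) (hi : 0 ≤ i) :
    (PySem.Str.slice s none (some i)).toList = s.toList.take i.toNat := by
  simp [PySem.Str.toList_slice, PySem.Chars.slice_eq_listSlice, PySem.List.slice_to _ hi]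

-- find inside a prefix slice, at the String level
lemma find_m_slice (s m : String) (hm : m.toList ≠ []) (i : Int) (hi : 0 ≤ i) :
    PySem.Str.find (PySem.Str.slice s none (some i)) m
    = if 0 ≤ PySem.Str.find s m ∧ (PySem.Str.find s m).toNat + m.toList.length ≤ i.toNat
      then PySem.Str.find s m else -1 := by
  rw [PySem.Str.find_eq, slice_take_toList s i hi, find_take _ hm, PySem.Str.find_eq]

-- composing two prefix slices keeps only the shorter one
lemma slice_slice_eq (s : String) (i j : Int) (hi : 0 ≤ i) (hj : 0 ≤ j)
    (h : j.toNat ≤ i.toNat) :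
    PySem.Str.slice (PySem.Str.slice s none (some i)) none (some j)
    = PySem.Str.slice s none (some j) := by
  rw [← String.toList_inj, slice_take_toList _ j hj, slice_take_toList s i hi,
      slice_take_toList s j hj, List.take_take, Nat.min_eq_left h]

-- if a marker prefixes l.drop i, its find is nonnegative and ≤ i
lemma find_le_of_prefix {l m : List Char} {i : ℕ} (h : m <+: l.drop i) :
    0 ≤ PySem.Chars.find l m ∧ (PySem.Chars.find l m).toNat ≤ i := by
  have h0 : 0 ≤ PySem.Chars.find l m :=
    (PySem.Chars.find_nonneg_iff l m).mpr
      ((PySem.Chars.isIn_iff_infix m l).mp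
        ((PySem.Chars.exists_prefix_drop_iff_isIn m l).mp ⟨i, h⟩))
  rcases PySem.Chars.find_spec h0 with ⟨_, hmin⟩
  refine ⟨h0, ?_⟩
  by_contra hc
  exact hmin i (by omega) h

-- if a marker's find is -1, that marker never prefixes any suffix
lemma not_prefix_of_find_neg {l m : List Char} (h : PySem.Chars.find l m = -1) (i : ℕ) :
    ¬ m <+: l.drop i := by
  intro hp
  have := (find_le_of_prefix hp).1
  omega

-- the streaming scan equals take at the minimum p of the nonnegative finds:
-- p is where a marker first starts, and nothing earlier is a marker
lemma pvCut_eq_take_minfind (l : List Char) (p : Int) (hp : 0 ≤ p)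
    (hmem : p = PySem.Chars.find l ['\\', 'n'] ∨ p = PySem.Chars.find l ['/', 'n']
          ∨ p = PySem.Chars.find l ['\n'])
    (hle1 : 0 ≤ PySem.Chars.find l ['\\', 'n'] → p ≤ PySem.Chars.find l ['\\', 'n'])
    (hle2 : 0 ≤ PySem.Chars.find l ['/', 'n'] → p ≤ PySem.Chars.find l ['/', 'n'])
    (hle3 : 0 ≤ PySem.Chars.find l ['\n'] → p ≤ PySem.Chars.find l ['\n']) :
    pvCut l = l.take p.toNat := by
  apply pvCut_take
  · rcases hmem with h | h | h
    · rw [h] at hp ⊢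
      exact Or.inr (Or.inl (PySem.Chars.find_spec hp).1)
    · rw [h] at hp ⊢
      exact Or.inr (Or.inr (PySem.Chars.find_spec hp).1)
    · rw [h] at hp ⊢
      exact Or.inl (PySem.Chars.find_spec hp).1
  · intro i hi hP
    rcases hP with h | h | h
    · rcases find_le_of_prefix h with ⟨h0, hle⟩
      have := hle3 h0; omega
    · rcases find_le_of_prefix h with ⟨h0, hle⟩
      have := hle1 h0; omega
    · rcases find_le_of_prefix h with ⟨h0, hle⟩
      have := hle2 h0; omega

lemma min?_one (a : Int) : PySem.List.min? [a] (fun i => i) = some a := by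
  rw [PySem.List.min?_id_cons]; rfl

lemma min?_two (a b : Int) : PySem.List.min? [a, b] (fun i => i) = some (min a b) := by
  rw [PySem.List.min?_id_cons]; rfl

lemma min?_three (a b d : Int) :
    PySem.List.min? [a, b, d] (fun i => i) = some (min (min a b) d) := by
  rw [PySem.List.min?_id_cons]; rfl

-- the cut stage of A: the sequential truncation loop equals a single slice at the
-- minimal non-negative find position (or the whole string if no marker occurs)
lemma cut_stage_eq (c : String) :
    List.foldl (fun cl m =>
        let idx := PySem.Str.find cl m
        if 0 ≤ idx then PySem.Str.slice cl none (some idx) else cl)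
      c ["\\n", "/n", "\n"]
    = match PySem.List.min? ((["\\n", "/n", "\n"].map (fun m => PySem.Str.find c m)).filter
                (fun i => decide (0 ≤ i))) (fun i => i) with
      | some p => PySem.Str.slice c none (some p)
      | none => c := by
  have hm1 : ("\\n" : String).toList = ['\\', 'n'] := by decide
  have hm2 : ("/n" : String).toList = ['/', 'n'] := by decide
  have hm3 : ("\n" : String).toList = ['\n'] := by decide
  simp only [List.foldl_cons, List.foldl_nil, List.map_cons, List.map_nil]
  have e1 : PySem.Str.find c "\\n" = PySem.Chars.find c.toList ['\\', 'n'] := by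
    rw [PySem.Str.find_eq, hm1]
  have e2 : PySem.Str.find c "/n" = PySem.Chars.find c.toList ['/', 'n'] := by
    rw [PySem.Str.find_eq, hm2]
  have e3 : PySem.Str.find c "\n" = PySem.Chars.find c.toList ['\n'] := by
    rw [PySem.Str.find_eq, hm3]
  set F1 := PySem.Chars.find c.toList ['\\', 'n'] with hF1
  set F2 := PySem.Chars.find c.toList ['/', 'n'] with hF2
  set F3 := PySem.Chars.find c.toList ['\n'] with hF3
  have hlo1 : -1 ≤ F1 := PySem.Chars.neg_one_le_find c.toList ['\\', 'n']
  have hlo2 : -1 ≤ F2 := PySem.Chars.neg_one_le_find c.toList ['/', 'n']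
  have hlo3 : -1 ≤ F3 := PySem.Chars.neg_one_le_find c.toList ['\n']
  rw [e1, e2, e3]
  by_cases h1 : 0 ≤ F1
  · rw [if_pos h1]
    have f2' := find_m_slice c "/n" (by decide) F1 h1
    rw [e2, (by decide : ("/n" : String).toList.length = 2)] at f2'
    rw [f2']
    by_cases h2 : 0 ≤ F2 ∧ F2.toNat < F1.toNat
    · -- "/n" occurs strictly before the "\n"-escape cut: it wins
      have hc2 : 0 ≤ F2 ∧ F2.toNat + 2 ≤ F1.toNat := ⟨h2.1, no_straddle h1 h2.1 h2.2⟩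
      rw [if_pos hc2, if_pos h2.1, slice_slice_eq c F1 F2 h1 h2.1 (by omega)]
      have f3' := find_m_slice c "\n" (by decide) F2 h2.1
      rw [e3, (by decide : ("\n" : String).toList.length = 1)] at f3'
      rw [f3']
      by_cases h3 : 0 ≤ F3 ∧ F3.toNat < F2.toNat
      · have hc3 : 0 ≤ F3 ∧ F3.toNat + 1 ≤ F2.toNat := ⟨h3.1, by omega⟩
        rw [if_pos hc3, if_pos h3.1, slice_slice_eq c F2 F3 h2.1 h3.1 (by omega)]
        have hcuts : List.filter (fun i => decide (0 ≤ i)) [F1, F2, F3] = [F1, F2, F3] := by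
          simp [h1, h2.1, h3.1]
        rw [hcuts, min?_three, (by omega : min (min F1 F2) F3 = F3)]
      · have hnc3 : ¬(0 ≤ F3 ∧ F3.toNat + 1 ≤ F2.toNat) := by omega
        rw [if_neg hnc3, if_neg (by decide : ¬(0:ℤ) ≤ -1)]
        rcases (by omega : F3 = -1 ∨ 0 ≤ F3) with hc3 | hc3
        · have hcuts : List.filter (fun i => decide (0 ≤ i)) [F1, F2, F3] = [F1, F2] := by
            simp [h1, h2.1, hc3]
          rw [hcuts, min?_two, (by omega : min F1 F2 = F2)]
        · have hcuts : List.filter (fun i => decide (0 ≤ i)) [F1, F2, F3] = [F1, F2, F3] := by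
            simp [h1, h2.1, hc3]
          rw [hcuts, min?_three, (by omega : min (min F1 F2) F3 = F2)]
    · -- no earlier "/n": the first cut stands so far
      have hnc2 : ¬(0 ≤ F2 ∧ F2.toNat + 2 ≤ F1.toNat) := by omega
      rw [if_neg hnc2, if_neg (by decide : ¬(0:ℤ) ≤ -1)]
      have f3' := find_m_slice c "\n" (by decide) F1 h1
      rw [e3, (by decide : ("\n" : String).toList.length = 1)] at f3'
      rw [f3']
      by_cases h3 : 0 ≤ F3 ∧ F3.toNat < F1.toNat
      · have hc3 : 0 ≤ F3 ∧ F3.toNat + 1 ≤ F1.toNat := ⟨h3.1, by omega⟩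
        rw [if_pos hc3, if_pos h3.1, slice_slice_eq c F1 F3 h1 h3.1 (by omega)]
        rcases (by omega : F2 = -1 ∨ 0 ≤ F2) with hc2 | hc2
        · have hcuts : List.filter (fun i => decide (0 ≤ i)) [F1, F2, F3] = [F1, F3] := by
            simp [h1, hc2, h3.1]
          rw [hcuts, min?_two, (by omega : min F1 F3 = F3)]
        · have hcuts : List.filter (fun i => decide (0 ≤ i)) [F1, F2, F3] = [F1, F2, F3] := by
            simp [h1, hc2, h3.1]
          rw [hcuts, min?_three, (by omega : min (min F1 F2) F3 = F3)]
      · have hnc3 : ¬(0 ≤ F3 ∧ F3.toNat + 1 ≤ F1.toNat) := by omega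
        rw [if_neg hnc3, if_neg (by decide : ¬(0:ℤ) ≤ -1)]
        rcases (by omega : F2 = -1 ∨ 0 ≤ F2) with hc2 | hc2 <;>
          rcases (by omega : F3 = -1 ∨ 0 ≤ F3) with hc3 | hc3
        · have hcuts : List.filter (fun i => decide (0 ≤ i)) [F1, F2, F3] = [F1] := by
            simp [h1, hc2, hc3]
          rw [hcuts, min?_one]
        · have hcuts : List.filter (fun i => decide (0 ≤ i)) [F1, F2, F3] = [F1, F3] := by
            simp [h1, hc2, hc3]
          rw [hcuts, min?_two, (by omega : min F1 F3 = F1)]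
        · have hcuts : List.filter (fun i => decide (0 ≤ i)) [F1, F2, F3] = [F1, F2] := by
            simp [h1, hc2, hc3]
          rw [hcuts, min?_two, (by omega : min F1 F2 = F1)]
        · have hcuts : List.filter (fun i => decide (0 ≤ i)) [F1, F2, F3] = [F1, F2, F3] := by
            simp [h1, hc2, hc3]
          rw [hcuts, min?_three, (by omega : min (min F1 F2) F3 = F1)]
  · -- no "\n"-escape occurrence
    rw [if_neg h1]
    have h1' : F1 = -1 := by omega
    rw [e2]
    by_cases h2 : 0 ≤ F2
    · rw [if_pos h2]
      have f3' := find_m_slice c "\n" (by decide) F2 h2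
      rw [e3, (by decide : ("\n" : String).toList.length = 1)] at f3'
      rw [f3']
      by_cases h3 : 0 ≤ F3 ∧ F3.toNat < F2.toNat
      · have hc3 : 0 ≤ F3 ∧ F3.toNat + 1 ≤ F2.toNat := ⟨h3.1, by omega⟩
        rw [if_pos hc3, if_pos h3.1, slice_slice_eq c F2 F3 h2 h3.1 (by omega)]
        have hcuts : List.filter (fun i => decide (0 ≤ i)) [F1, F2, F3] = [F2, F3] := by
          simp [h1', h2, h3.1]
        rw [hcuts, min?_two, (by omega : min F2 F3 = F3)]
      · have hnc3 : ¬(0 ≤ F3 ∧ F3.toNat + 1 ≤ F2.toNat) := by omega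
        rw [if_neg hnc3, if_neg (by decide : ¬(0:ℤ) ≤ -1)]
        rcases (by omega : F3 = -1 ∨ 0 ≤ F3) with hc3 | hc3
        · have hcuts : List.filter (fun i => decide (0 ≤ i)) [F1, F2, F3] = [F2] := by
            simp [h1', h2, hc3]
          rw [hcuts, min?_one]
        · have hcuts : List.filter (fun i => decide (0 ≤ i)) [F1, F2, F3] = [F2, F3] := by
            simp [h1', h2, hc3]
          rw [hcuts, min?_two, (by omega : min F2 F3 = F2)]
    · rw [if_neg h2]
      have h2' : F2 = -1 := by omega
      rw [e3]
      by_cases h3 : 0 ≤ F3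
      · rw [if_pos h3]
        have hcuts : List.filter (fun i => decide (0 ≤ i)) [F1, F2, F3] = [F3] := by
          simp [h1', h2', h3]
        rw [hcuts, min?_one]
      · rw [if_neg h3]
        have h3' : F3 = -1 := by omega
        have hcuts : List.filter (fun i => decide (0 ≤ i)) [F1, F2, F3] = [] := by
          simp [h1', h2', h3']
        rw [hcuts, (PySem.List.min?_eq_none_iff _ _).mpr rfl]

-- the min-slice form in turn equals B's streaming scan
lemma minslice_eq_cut (c : String) :
    (match PySem.List.min? ((["\\n", "/n", "\n"].map (fun m => PySem.Str.find c m)).filter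
              (fun i => decide (0 ≤ i))) (fun i => i) with
     | some p => PySem.Str.slice c none (some p)
     | none => c)
    = String.ofList (pvCut c.toList) := by
  have e1 : PySem.Str.find c "\\n" = PySem.Chars.find c.toList ['\\', 'n'] := by
    rw [PySem.Str.find_eq, (by decide : ("\\n" : String).toList = ['\\', 'n'])]
  have e2 : PySem.Str.find c "/n" = PySem.Chars.find c.toList ['/', 'n'] := by
    rw [PySem.Str.find_eq, (by decide : ("/n" : String).toList = ['/', 'n'])]
  have e3 : PySem.Str.find c "\n" = PySem.Chars.find c.toList ['\n'] := by
    rw [PySem.Str.find_eq, (by decide : ("\n" : String).toList = ['\n'])]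
  simp only [List.map_cons, List.map_nil, e1, e2, e3]
  set F1 := PySem.Chars.find c.toList ['\\', 'n'] with hF1
  set F2 := PySem.Chars.find c.toList ['/', 'n'] with hF2
  set F3 := PySem.Chars.find c.toList ['\n'] with hF3
  have hlo1 : -1 ≤ F1 := PySem.Chars.neg_one_le_find c.toList ['\\', 'n']
  have hlo2 : -1 ≤ F2 := PySem.Chars.neg_one_le_find c.toList ['/', 'n']
  have hlo3 : -1 ≤ F3 := PySem.Chars.neg_one_le_find c.toList ['\n']
  by_cases hall : F1 = -1 ∧ F2 = -1 ∧ F3 = -1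
  · have hcuts : List.filter (fun i => decide (0 ≤ i)) [F1, F2, F3] = [] := by
      simp [hall.1, hall.2.1, hall.2.2]
    rw [hcuts, (PySem.List.min?_eq_none_iff _ _).mpr rfl]
    rw [pvCut_all c.toList (fun i => by
      rintro (h | h | h)
      · exact not_prefix_of_find_neg (hF3 ▸ hall.2.2) i h
      · exact not_prefix_of_find_neg (hF1 ▸ hall.1) i h
      · exact not_prefix_of_find_neg (hF2 ▸ hall.2.1) i h)]
    simp
  · -- at least one marker occurs: the minimum of the nonnegative finds is the cut point
    have key : ∀ (p : Int), 0 ≤ p →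
        (p = F1 ∨ p = F2 ∨ p = F3) →
        (0 ≤ F1 → p ≤ F1) → (0 ≤ F2 → p ≤ F2) → (0 ≤ F3 → p ≤ F3) →
        PySem.Str.slice c none (some p) = String.ofList (pvCut c.toList) := by
      intro p hp hmem hle1 hle2 hle3
      rw [← String.toList_inj, slice_take_toList c p hp]
      rw [pvCut_eq_take_minfind c.toList p hp hmem hle1 hle2 hle3]
      simp
    rcases (by omega : F1 = -1 ∨ 0 ≤ F1) with hc1 | hc1 <;>
      rcases (by omega : F2 = -1 ∨ 0 ≤ F2) with hc2 | hc2 <;>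
      rcases (by omega : F3 = -1 ∨ 0 ≤ F3) with hc3 | hc3
    · exact absurd ⟨hc1, hc2, hc3⟩ hall
    · have hcuts : List.filter (fun i => decide (0 ≤ i)) [F1, F2, F3] = [F3] := by
        simp [hc1, hc2, hc3]
      rw [hcuts, min?_one]
      exact key F3 hc3 (Or.inr (Or.inr rfl)) (by omega) (by omega) (by omega)
    · have hcuts : List.filter (fun i => decide (0 ≤ i)) [F1, F2, F3] = [F2] := by
        simp [hc1, hc2, hc3]
      rw [hcuts, min?_one]
      exact key F2 hc2 (Or.inr (Or.inl rfl)) (by omega) (by omega) (by omega)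
    · have hcuts : List.filter (fun i => decide (0 ≤ i)) [F1, F2, F3] = [F2, F3] := by
        simp [hc1, hc2, hc3]
      rw [hcuts, min?_two]
      exact key (min F2 F3) (by omega)
        (by rcases le_total F2 F3 with h | h;
            · exact Or.inr (Or.inl (by omega))
            · exact Or.inr (Or.inr (by omega)))
        (by omega) (by omega) (by omega)
    · have hcuts : List.filter (fun i => decide (0 ≤ i)) [F1, F2, F3] = [F1] := by
        simp [hc1, hc2, hc3]
      rw [hcuts, min?_one]
      exact key F1 hc1 (Or.inl rfl) (by omega) (by omega) (by omega)
    · have hcuts : List.filter (fun i => decide (0 ≤ i)) [F1, F2, F3] = [F1, F3] := by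
        simp [hc1, hc2, hc3]
      rw [hcuts, min?_two]
      exact key (min F1 F3) (by omega)
        (by rcases le_total F1 F3 with h | h;
            · exact Or.inl (by omega)
            · exact Or.inr (Or.inr (by omega)))
        (by omega) (by omega) (by omega)
    · have hcuts : List.filter (fun i => decide (0 ≤ i)) [F1, F2, F3] = [F1, F2] := by
        simp [hc1, hc2, hc3]
      rw [hcuts, min?_two]
      exact key (min F1 F2) (by omega)
        (by rcases le_total F1 F2 with h | h;
            · exact Or.inl (by omega)
            · exact Or.inr (Or.inl (by omega)))
        (by omega) (by omega) (by omega)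
    · have hcuts : List.filter (fun i => decide (0 ≤ i)) [F1, F2, F3] = [F1, F2, F3] := by
        simp [hc1, hc2, hc3]
      rw [hcuts, min?_three]
      exact key (min (min F1 F2) F3) (by omega)
        (by rcases le_total (min F1 F2) F3 with h | h
            · rcases le_total F1 F2 with h' | h'
              · exact Or.inl (by omega)
              · exact Or.inr (Or.inl (by omega))
            · exact Or.inr (Or.inr (by omega)))
        (by omega) (by omega) (by omega)

-- A's rstrip and B's pop loop compute the same string
lemma rstrip_eq (l : List Char) :
    pyRstripChars (String.ofList l) ".,;)-" = String.ofList (pvDropTrail l) := by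
  simp [pyRstripChars, pvDropTrail]

-- the whole pipeline, with the strip result generalized
lemma main_eq (c : String) :
    (if c = ""
     then ""
     else
       (fun r => if !PySem.Str.startswith r "http://" && !PySem.Str.startswith r "https://"
                 then "" else r)
         (pyRstripChars
           (List.foldl (fun cl m =>
               let idx := PySem.Str.find cl m
               if 0 ≤ idx then PySem.Str.slice cl none (some idx) else cl)
             c ["\\n", "/n", "\n"]) ".,;)-"))
    = (fun r => if PySem.Str.startswith r "http://" || PySem.Str.startswith r "https://"
                then r else "")
        (String.ofList (pvDropTrail (pvCut c.toList))) := by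
  by_cases hempty : c = ""
  · subst hempty
    decide
  · rw [if_neg hempty, cut_stage_eq, minslice_eq_cut, rstrip_eq]
    simp only []
    cases hp1 : PySem.Str.startswith (String.ofList (pvDropTrail (pvCut c.toList))) "http://" <;>
      cases hp2 : PySem.Str.startswith (String.ofList (pvDropTrail (pvCut c.toList))) "https://" <;>
      simp

-- ===== VERDICT (by name: the statement is the Claim_ definition above) =====
theorem normalize_extracted_url_py_spec : Claim_equal_normalize_extracted_url_py := by
  intro url _hdom
  exact main_eq (PySem.Str.strip url)
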